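-- pv_equiv track=rewrite | github.com/Fukuyori-Kanta/CM_Analysis | scene_integration_mod.py | subtract_list
-- ===== SOURCE A (Python) =====
-- def subtract_list(lst1, lst2):
--     lst = lst1.copy()
--     for element in lst2:
--         try:
--             lst.remove(element)
--         except ValueError:
--             pass
--     return lst
-- ===== SOURCE B (Python) =====
-- def subtract_list(lst1, lst2):
--     cnt = {}
--     for x in lst2:
--         cnt[x] = cnt.get(x, 0) + 1
--     out = []
--     for x in lst1:
--         if cnt.get(x, 0) > 0:
--             cnt[x] = cnt[x] - 1
--         else:
--             out.append(x)
--     return out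
-- ===== Notes on version B (the rewrite author's own statement) =====
-- stated objective: faster
-- what changed: Replaces the per-element list.remove scan (one O(n) scan per lst2 element) with a hash counter of lst2 built once and a single pass over lst1 that drops an element while its count is positive.
import Mathlib
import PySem

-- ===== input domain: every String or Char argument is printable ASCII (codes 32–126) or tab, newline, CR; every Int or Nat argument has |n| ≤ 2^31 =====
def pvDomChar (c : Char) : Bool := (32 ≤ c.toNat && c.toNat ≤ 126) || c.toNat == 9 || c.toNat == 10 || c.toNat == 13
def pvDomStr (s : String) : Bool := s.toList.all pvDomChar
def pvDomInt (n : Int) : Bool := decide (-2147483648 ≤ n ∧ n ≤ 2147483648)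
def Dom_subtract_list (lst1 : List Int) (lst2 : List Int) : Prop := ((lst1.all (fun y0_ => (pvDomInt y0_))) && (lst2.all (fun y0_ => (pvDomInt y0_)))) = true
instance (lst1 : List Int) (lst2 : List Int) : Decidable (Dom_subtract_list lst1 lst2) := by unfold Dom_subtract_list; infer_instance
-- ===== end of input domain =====

-- B builds a counter of lst2 once and drops elements in a single pass over lst1 (faster: O(n+m) vs A's O(n*m)).

-- ===== PORT A =====
-- lst.remove(element) inside try/except ValueError: keep lst unchanged when the element is absent
def subtract_list (lst1 : List Int) (lst2 : List Int) : List Int :=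
  lst2.foldl (fun lst element => (PySem.List.remove? lst element).getD lst) lst1

-- ===== PORT B =====
def subtract_list_alt (lst1 : List Int) (lst2 : List Int) : List Int :=
  let cnt : PySem.Dict Int Int :=
    lst2.foldl (fun d x => d.insert x (d.getD x 0 + 1)) PySem.Dict.empty
  let r := lst1.foldl
    (fun (p : List Int × PySem.Dict Int Int) x =>
      if p.2.getD x 0 > 0 then (p.1, p.2.insert x (p.2.getD x 0 - 1))
      else (p.1 ++ [x], p.2))
    (([] : List Int), cnt)
  r.1

-- ===== PRECONDITION & SPEC =====
def Spec_subtract_list (lst1 : List Int) (lst2 : List Int) (out : List Int) : Prop := out = subtract_list_alt lst1 lst2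
instance (lst1 : List Int) (lst2 : List Int) (out : List Int) : Decidable (Spec_subtract_list lst1 lst2 out) := by unfold Spec_subtract_list; infer_instance

-- ===== CLAIM (what is proved, stated in full; the proofs are below) =====
def Claim_equal_subtract_list : Prop := ∀ (lst1 : List Int) (lst2 : List Int), Dom_subtract_list lst1 lst2 → Spec_subtract_list lst1 lst2 (subtract_list lst1 lst2)

-- ===== LEMMAS AND PROOFS =====

-- Abstract one-pass filter keyed by a counting function (proof device only)
def keyF (f : Int → Int) : List Int → List Int
  | [] => []
  | x :: xs => if f x > 0 then keyF (fun y => if y = x then f x - 1 else f y) xs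
               else x :: keyF f xs

-- remove-with-fallback, one cons step
theorem remove1_cons (x : Int) (xs : List Int) (e : Int) :
    (PySem.List.remove? (x :: xs) e).getD (x :: xs)
      = if x = e then xs else x :: (PySem.List.remove? xs e).getD xs := by
  by_cases h : x = e
  · subst h; simp
  · rw [PySem.List.remove?_cons_of_ne xs h, if_neg h]
    cases PySem.List.remove? xs e <;> simp

-- Key lemma: bumping the counter at e = removing the first e from the list
theorem keyF_bump (lst1 : List Int) : ∀ (f : Int → Int) (e : Int), 0 ≤ f e →
    keyF (fun y => if y = e then f e + 1 else f y) lst1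
      = keyF f ((PySem.List.remove? lst1 e).getD lst1) := by
  induction lst1 with
  | nil => intro f e _; simp [keyF, PySem.List.remove?]
  | cons x xs ih =>
    intro f e hfe
    rw [remove1_cons]
    by_cases hxe : x = e
    · subst hxe
      rw [if_pos rfl]
      show (if (if x = x then f x + 1 else f x) > 0 then
              keyF (fun y => if y = x then (if x = x then f x + 1 else f x) - 1
                             else if y = x then f x + 1 else f y) xs
            else x :: keyF (fun y => if y = x then f x + 1 else f y) xs) = keyF f xs
      rw [if_pos (by simp; omega)]
      have hfun : (fun y => if y = x then (if x = x then f x + 1 else f x) - 1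
                    else if y = x then f x + 1 else f y) = f := by
        funext y; by_cases hy : y = x <;> simp [hy]
      rw [hfun]
    · have hexn : e ≠ x := fun h => hxe h.symm
      rw [if_neg hxe]
      show (if (if x = e then f e + 1 else f x) > 0 then
              keyF (fun y => if y = x then (if x = e then f e + 1 else f x) - 1
                             else if y = e then f e + 1 else f y) xs
            else x :: keyF (fun y => if y = e then f e + 1 else f y) xs)
          = keyF f (x :: (PySem.List.remove? xs e).getD xs)
      by_cases hfx : f x > 0
      · rw [if_pos (by rw [if_neg hxe]; exact hfx)]
        have hfun : (fun y => if y = x then (if x = e then f e + 1 else f x) - 1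
                      else if y = e then f e + 1 else f y)
            = (fun y => if y = e then (fun z => if z = x then f x - 1 else f z) e + 1
                        else (fun z => if z = x then f x - 1 else f z) y) := by
          funext y
          by_cases hyx : y = x
          · subst hyx; simp [hxe]
          · by_cases hye : y = e <;> simp [hyx, hye, hexn]
        rw [hfun, ih (fun z => if z = x then f x - 1 else f z) e (by simp [hexn]; exact hfe)]
        conv_rhs => rw [keyF]
        rw [if_pos hfx]
      · rw [if_neg (by rw [if_neg hxe]; exact hfx)]
        rw [ih f e hfe]
        conv_rhs => rw [keyF]
        rw [if_neg hfx]

-- keyF with the all-zero counter is the identity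
theorem keyF_zero (l : List Int) : keyF (fun _ => 0) l = l := by
  induction l with
  | nil => rfl
  | cons x xs ih => simp [keyF, ih]

-- A equals keyF on the count function of lst2
theorem portA_eq_keyF (lst2 : List Int) : ∀ (lst1 : List Int),
    subtract_list lst1 lst2 = keyF (fun x => (lst2.count x : Int)) lst1 := by
  induction lst2 with
  | nil =>
    intro lst1
    simp only [subtract_list, List.foldl_nil]
    have h : (fun x => ((List.count x ([] : List Int) : Nat) : Int)) = (fun _ => (0 : Int)) := by
      funext x; simp
    rw [h, keyF_zero]
  | cons e rest ih =>
    intro lst1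
    have hstep : subtract_list lst1 (e :: rest)
        = subtract_list ((PySem.List.remove? lst1 e).getD lst1) rest := by
      simp [subtract_list]
    rw [hstep, ih]
    have hfun : (fun x => (((e :: rest).count x : Nat) : Int))
        = (fun y => if y = e then (fun x => ((rest.count x : Nat) : Int)) e + 1
                    else (fun x => ((rest.count x : Nat) : Int)) y) := by
      funext x
      by_cases hx : x = e
      · subst hx; simp
      · have hex : e ≠ x := fun h => hx h.symm
        simp [hx, hex]
    rw [hfun, keyF_bump lst1 (fun x => ((rest.count x : Nat) : Int)) e (by positivity)]

-- B's lst1 pass equals keyF on the dict's getD function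
theorem portB_loop_eq_keyF (lst1 : List Int) : ∀ (acc : List Int) (d : PySem.Dict Int Int),
    (lst1.foldl
      (fun (p : List Int × PySem.Dict Int Int) x =>
        if p.2.getD x 0 > 0 then (p.1, p.2.insert x (p.2.getD x 0 - 1))
        else (p.1 ++ [x], p.2)) (acc, d)).1
      = acc ++ keyF (fun x => d.getD x 0) lst1 := by
  induction lst1 with
  | nil => intro acc d; simp [keyF]
  | cons x xs ih =>
    intro acc d
    by_cases h : d.getD x 0 > 0
    · rw [List.foldl_cons]
      simp only [h, if_pos, keyF]
      rw [ih acc (d.insert x (d.getD x 0 - 1))]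
      have hfun : (fun y => (d.insert x (d.getD x 0 - 1)).getD y 0)
          = (fun y => if y = x then d.getD x 0 - 1 else d.getD y 0) := by
        funext y; rw [PySem.Dict.getD_insert]
      rw [hfun]
    · rw [List.foldl_cons]
      simp only [h, keyF, if_false]
      rw [ih (acc ++ [x]) d]
      simp

-- ===== VERDICT (by name: the statement is the Claim_ definition above) =====
theorem subtract_list_spec : Claim_equal_subtract_list := by
  intro lst1 lst2 _
  unfold Spec_subtract_list subtract_list_alt
  rw [portA_eq_keyF, portB_loop_eq_keyF lst1 [] _]
  have h : (fun x => (lst2.foldl (fun d x => d.insert x (d.getD x 0 + 1)) PySem.Dict.empty).getD x 0)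
      = (fun x => (lst2.count x : Int)) := by
    funext x
    rw [PySem.Dict.getD_foldl_insert_add_one]
    simp
  rw [h]
  simp
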